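-- pv_equiv track=rewrite | github.com/SantinoVicentini/LearningPython-utdt-exercises | clase2/tuplas.py | dni_mellizos
-- ===== SOURCE A (Python) =====
-- from typing import List, Dict, Tuple, Set
--
-- def dni_mellizos(personas:list[tuple[str, int, int]]) -> Dict[int, List[tuple[str, int]]]:
--     dict_personas:Dict[int, List[tuple[str, int]]] = dict()
--     persona:int
--     for persona in personas:
--         if persona[1] in dict_personas.keys():
--             dict_personas[persona[1]].append((persona[0], persona[2]))
--         else:
--             dict_personas[persona[1]] = [(persona[0], persona[2])]
--
--     dnis_mellizos:Dict[int, List[tuple[str, int]]] = dict()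
--     clave:int
--     valor:List[tuple[str, int]]
--     for clave, valor in dict_personas.items():
--         if len(valor) > 1:
--             dnis_mellizos[clave] = valor
--     return dnis_mellizos
-- ===== SOURCE B (Python) =====
-- from typing import List, Dict, Tuple
--
-- def dni_mellizos(personas: list[tuple[str, int, int]]) -> Dict[int, List[tuple[str, int]]]:
--     # One counting pass, then one building pass that only ever creates the
--     # groups that are kept -- no full grouping dict, no second filtering scan.
--     counts: Dict[int, int] = {}
--     for persona in personas:
--         counts[persona[1]] = counts.get(persona[1], 0) + 1
--     mellizos: Dict[int, List[tuple[str, int]]] = {}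
--     for nombre, dni, edad in personas:
--         if counts[dni] > 1:
--             mellizos.setdefault(dni, []).append((nombre, edad))
--     return mellizos
-- ===== Notes on version B (the rewrite author's own statement) =====
-- stated objective: alternative
-- what changed: Instead of grouping everything into a dict and then filtering the groups by length in a second dict, B first counts DNI multiplicities in one pass and then builds only the duplicate groups directly with setdefault, never materialising singleton groups or a second filtering pass.
import Mathlib
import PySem

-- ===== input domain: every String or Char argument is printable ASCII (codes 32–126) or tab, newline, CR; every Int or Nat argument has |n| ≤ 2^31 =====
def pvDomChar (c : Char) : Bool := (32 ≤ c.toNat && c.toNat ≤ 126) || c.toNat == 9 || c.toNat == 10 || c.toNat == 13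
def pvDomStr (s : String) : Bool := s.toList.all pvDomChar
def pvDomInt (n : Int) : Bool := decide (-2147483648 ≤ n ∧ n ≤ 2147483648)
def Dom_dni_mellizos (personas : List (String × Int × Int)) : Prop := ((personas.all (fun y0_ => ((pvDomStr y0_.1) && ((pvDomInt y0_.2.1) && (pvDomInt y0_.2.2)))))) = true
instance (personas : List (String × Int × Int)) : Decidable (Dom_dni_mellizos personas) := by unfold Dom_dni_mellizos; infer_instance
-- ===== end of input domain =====

-- B replaces A's group-everything-then-filter two-dict pipeline by a counting pass plus
-- a single building pass that only creates the duplicate groups (alternative decomposition, same O(n)).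


-- ===== PORT A =====
def dni_mellizos (personas : List (String × Int × Int)) : List (Int × List (String × Int)) :=
  let dict_personas : PySem.Dict Int (List (String × Int)) :=
    personas.foldl (fun d persona =>
      if d.contains persona.2.1 then
        d.modify persona.2.1 [] (fun l => l ++ [(persona.1, persona.2.2)])
      else
        d.insert persona.2.1 [(persona.1, persona.2.2)]) PySem.Dict.empty
  let dnis_mellizos : PySem.Dict Int (List (String × Int)) :=
    dict_personas.items.foldl (fun r kv =>
      if kv.2.length > 1 then r.insert kv.1 kv.2 else r) PySem.Dict.empty
  dnis_mellizos.items

-- ===== PORT B =====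
def dni_mellizos_alt (personas : List (String × Int × Int)) : List (Int × List (String × Int)) :=
  let counts : PySem.Dict Int Int :=
    personas.foldl (fun d persona => d.insert persona.2.1 (d.getD persona.2.1 0 + 1)) PySem.Dict.empty
  let mellizos : PySem.Dict Int (List (String × Int)) :=
    personas.foldl (fun r p =>
      if counts.getD p.2.1 0 > 1 then r.modify p.2.1 [] (fun l => l ++ [(p.1, p.2.2)]) else r)
      PySem.Dict.empty
  mellizos.items

-- ===== PRECONDITION & SPEC =====
def Spec_dni_mellizos (personas : List (String × Int × Int)) (out : List (Int × List (String × Int))) : Prop := out = dni_mellizos_alt personas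
instance (personas : List (String × Int × Int)) (out : List (Int × List (String × Int))) : Decidable (Spec_dni_mellizos personas out) := by unfold Spec_dni_mellizos; infer_instance

-- ===== CLAIM (what is proved, stated in full; the proofs are below) =====
def Claim_equal_dni_mellizos : Prop := ∀ (personas : List (String × Int × Int)), Dom_dni_mellizos personas → Spec_dni_mellizos personas (dni_mellizos personas)

-- ===== LEMMAS AND PROOFS =====

-- pair (key, value) as the group dicts see them
def pvPair (p : String × Int × Int) : Int × (String × Int) := (p.2.1, (p.1, p.2.2))

-- a foldl with an if-skip is a foldl over the filtered list (wrapper around List.foldl_filter)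
theorem pv_foldl_skip {α β : Type} (p : α → Bool) (f : β → α → β) (l : List α) (i : β) :
    l.foldl (fun s a => if p a then f s a else s) i = (l.filter p).foldl f i := by
  rw [List.foldl_filter]

-- Set.ofList commutes with filter
theorem pv_setAdd_filter {α : Type} [BEq α] [LawfulBEq α] (q : α → Bool) (xs : List α) :
    ∀ s : List α, (List.foldl PySem.Set.add s xs).filter q = List.foldl PySem.Set.add (s.filter q) (xs.filter q) := by
  induction xs with
  | nil => intro s; rfl
  | cons x xs ih =>
    intro s
    have hstep : List.filter q (PySem.Set.add s x) = if q x = true then PySem.Set.add (List.filter q s) x else List.filter q s := by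
      simp only [PySem.Set.add]
      by_cases hm : x ∈ s
      · by_cases hq : q x = true
        · have : x ∈ List.filter q s := List.mem_filter.mpr ⟨hm, hq⟩
          simp [hm, hq, this]
        · simp [hm, hq]
      · by_cases hq : q x = true
        · have : x ∉ List.filter q s := fun h => hm (List.mem_filter.mp h).1
          simp [hm, hq, this, List.filter_append]
        · simp [hm, hq, List.filter_append]
    by_cases hq : q x = true
    · simp only [List.foldl_cons, List.filter_cons, hq, if_pos, List.foldl_cons]
      rw [ih, hstep, if_pos hq]
    · simp only [List.foldl_cons, List.filter_cons, hq]
      rw [ih, hstep, if_neg hq]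
      simp

theorem pv_ofList_filter {α : Type} [BEq α] [LawfulBEq α] (q : α → Bool) (xs : List α) :
    (PySem.Set.ofList xs).filter q = PySem.Set.ofList (xs.filter q) := by
  unfold PySem.Set.ofList
  rw [pv_setAdd_filter]
  rfl

-- A's grouping branch is exactly a modify
theorem pv_branch_eq :
    (fun (d : PySem.Dict Int (List (String × Int))) (persona : String × Int × Int) =>
      if d.contains persona.2.1 then
        d.modify persona.2.1 [] (fun l => l ++ [(persona.1, persona.2.2)])
      else
        d.insert persona.2.1 [(persona.1, persona.2.2)]) =
    (fun d persona => d.modify persona.2.1 [] (fun l => l ++ [(persona.1, persona.2.2)])) := by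
  funext d p
  by_cases hc : d.contains p.2.1 = true
  · simp [hc]
  · simp only [Bool.not_eq_true] at hc
    simp [hc, PySem.Dict.modify, PySem.Dict.getD_of_not_contains _ _ hc]

-- characterization of the grouping fold: items = first-occurrence key list paired with per-key sublists
theorem pv_group_items (l : List (String × Int × Int)) :
    (l.foldl (fun d p => d.modify p.2.1 [] (fun v => v ++ [(p.1, p.2.2)])) PySem.Dict.empty).items
    = (PySem.Set.ofList (l.map (fun p => p.2.1))).map
        (fun k => (k, ((l.filter (fun p => p.2.1 == k)).map (fun p => (p.1, p.2.2))))) := by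
  set G := l.foldl (fun d p => d.modify p.2.1 [] (fun v => v ++ [(p.1, p.2.2)]))
      (PySem.Dict.empty : PySem.Dict Int (List (String × Int))) with hG
  have hkeys : G.keys = PySem.Set.ofList (l.map (fun p => p.2.1)) := by
    rw [hG, PySem.Dict.keys_foldl_modify_key l (fun p => p.2.1) [] (fun _ p => fun v => v ++ [(p.1, p.2.2)])]
    simp [PySem.Set.update_nil_left]
  have hnd : G.keys.Nodup := by
    rw [hG]
    exact PySem.Dict.nodup_keys_foldl_modify_key l (fun p => p.2.1) [] _ _ (by simp)
  have hget : ∀ k : Int, G.getD k [] = (l.filter (fun p => p.2.1 == k)).map (fun p => (p.1, p.2.2)) := by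
    intro k
    have h2 : G = (l.map pvPair).foldl (fun d q => d.modify q.1 [] (fun v => v ++ [q.2])) PySem.Dict.empty := by
      rw [hG, List.foldl_map]
      rfl
    rw [h2, PySem.Dict.getD_foldl_modify_append]
    simp only [PySem.Dict.getD_empty, List.nil_append]
    simp [List.filter_map, Function.comp_def, pvPair]
  rw [PySem.Dict.items_eq_map_keys G hnd [], hkeys]
  exact List.map_congr_left (fun k _ => by rw [hget k])

-- A's result: first-occurrence key order, filtered to groups of size > 1
theorem pvA_char (personas : List (String × Int × Int)) :
    dni_mellizos personas =
    ((PySem.Set.ofList (personas.map (fun p => p.2.1))).filter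
        (fun k => decide (1 < (personas.map (fun p => p.2.1)).count k))).map
      (fun k => (k, (personas.filter (fun p => p.2.1 == k)).map (fun p => (p.1, p.2.2)))) := by
  simp only [dni_mellizos]
  rw [pv_branch_eq, pv_group_items]
  have hdec : (fun (r : PySem.Dict Int (List (String × Int))) (kv : Int × List (String × Int)) =>
      if kv.2.length > 1 then r.insert kv.1 kv.2 else r) =
      (fun r kv => if (decide (kv.2.length > 1)) = true then r.insert kv.1 kv.2 else r) := by
    simp
  rw [hdec, pv_foldl_skip]
  set S := PySem.Set.ofList (personas.map (fun p => p.2.1)) with hS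
  set f := fun k : Int => (k, (personas.filter (fun p => p.2.1 == k)).map (fun p => (p.1, p.2.2))) with hf
  set l := (S.map f).filter (fun kv => decide (kv.2.length > 1)) with hl
  have hfresh : ∀ a ∈ l, (PySem.Dict.empty : PySem.Dict Int (List (String × Int))).contains a.1 = false := by
    intro a _; exact PySem.Dict.contains_empty a.1
  have hnd : (l.map (fun a => a.1)).Nodup := by
    have hsub : (l.map (fun a => a.1)).Sublist ((S.map f).map (fun a => a.1)) :=
      List.Sublist.map _ List.filter_sublist
    have hSnd : S.Nodup := by rw [hS]; exact PySem.Set.nodup_ofList _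
    have h2 : ((S.map f).map (fun a => a.1)).Nodup := by
      rw [List.map_map]
      have hcomp : ((fun a : Int × List (String × Int) => a.1) ∘ f) = id := by
        funext k; simp [hf]
      rw [hcomp, List.map_id]
      exact hSnd
    exact h2.sublist hsub
  rw [PySem.Dict.items_foldl_insert_fresh l (fun a => a.1) (fun a => a.2) PySem.Dict.empty hfresh hnd]
  have hempty : (PySem.Dict.empty : PySem.Dict Int (List (String × Int))).items = [] := rfl
  simp only [hempty, List.nil_append]
  have hid : l.map (fun a => (a.1, a.2)) = l := by simp
  rw [hid, hl, List.filter_map]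
  congr 1
  apply List.filter_congr
  intro k _
  simp [hf, List.count_eq_countP, List.countP_eq_length_filter, List.filter_map, Function.comp_def]

-- a foldl with a Prop-if-skip is a foldl over the filtered list
theorem pv_foldl_skipP {α β : Type} (P : α → Prop) [DecidablePred P] (f : β → α → β) (l : List α) (i : β) :
    l.foldl (fun s a => if P a then f s a else s) i = (l.filter (fun a => decide (P a))).foldl f i := by
  rw [List.foldl_filter]
  simp

-- B's result: groups built only over the people whose DNI occurs more than once
theorem pvB_char (personas : List (String × Int × Int)) :
    dni_mellizos_alt personas =
    (PySem.Set.ofList ((personas.filter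
        (fun p => decide ((1:Int) < ((personas.map (fun p => p.2.1)).count p.2.1 : Int)))).map (fun p => p.2.1))).map
      (fun k => (k, ((personas.filter
        (fun p => decide ((1:Int) < ((personas.map (fun p => p.2.1)).count p.2.1 : Int)))).filter
          (fun p => p.2.1 == k)).map (fun p => (p.1, p.2.2)))) := by
  simp only [dni_mellizos_alt]
  set C := personas.foldl (fun d persona => d.insert persona.2.1 (d.getD persona.2.1 0 + 1))
      (PySem.Dict.empty : PySem.Dict Int Int) with hC
  have hcnt : ∀ k : Int, C.getD k 0 = ((personas.map (fun p => p.2.1)).count k : Int) := by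
    intro k
    have hfold : C = (personas.map (fun p => p.2.1)).foldl (fun d x => d.insert x (d.getD x 0 + 1)) PySem.Dict.empty := by
      rw [hC, List.foldl_map]
    rw [hfold, PySem.Dict.getD_foldl_insert_add_one]
    simp [PySem.Dict.getD_empty]
  have hskip : (personas.foldl (fun r p =>
        if C.getD p.2.1 0 > 1 then r.modify p.2.1 [] (fun l => l ++ [(p.1, p.2.2)]) else r)
        (PySem.Dict.empty : PySem.Dict Int (List (String × Int))))
      = (personas.filter (fun p => decide (C.getD p.2.1 0 > 1))).foldl
        (fun r p => r.modify p.2.1 [] (fun l => l ++ [(p.1, p.2.2)])) PySem.Dict.empty :=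
    pv_foldl_skipP _ _ _ _
  rw [hskip]
  have hfilt : personas.filter (fun p => decide (C.getD p.2.1 0 > 1)) =
      personas.filter (fun p => decide ((1:Int) < ((personas.map (fun p => p.2.1)).count p.2.1 : Int))) :=
    List.filter_congr (fun p _ => by simp [hcnt])
  rw [hfilt, pv_group_items]

-- ===== VERDICT (by name: the statement is the Claim_ definition above) =====
theorem dni_mellizos_spec : Claim_equal_dni_mellizos := by
  intro personas _
  unfold Spec_dni_mellizos
  rw [pvA_char, pvB_char]
  set keysL := personas.map (fun p : String × Int × Int => p.2.1) with hk
  set qI := fun k : Int => decide ((1:Int) < (keysL.count k : Int)) with hqI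
  have hmapfilt : (personas.filter (fun p => qI p.2.1)).map (fun p : String × Int × Int => p.2.1)
      = keysL.filter qI := by
    rw [hk, List.filter_map]
    simp [Function.comp_def]
  have hP : (fun p : String × Int × Int => decide ((1:Int) < (keysL.count p.2.1 : Int))) = (fun p => qI p.2.1) := rfl
  rw [hP, hmapfilt, ← pv_ofList_filter qI keysL]
  have hq : (fun k : Int => decide (1 < keysL.count k)) = qI := by
    funext k
    rw [hqI]
    exact decide_eq_decide.mpr (by exact_mod_cast Iff.rfl)
  rw [hq]
  apply List.map_congr_left
  intro k hkmem
  have hqk : qI k = true := (List.mem_filter.mp hkmem).2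
  have hff : (personas.filter (fun p => qI p.2.1)).filter (fun p => p.2.1 == k)
      = personas.filter (fun p => p.2.1 == k) := by
    rw [List.filter_filter]
    apply List.filter_congr
    intro p _
    by_cases hbe : p.2.1 == k
    · have : p.2.1 = k := by simpa using hbe
      simp [this, hqk]
    · simp [hbe]
  rw [hff]
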